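-- pv_equiv track=rewrite | github.com/Strategizing/heiwa-universe | apps/heiwa_hub/cognition/intent_normalizer.py | _missing_details
-- ===== SOURCE A (Python) =====
-- def _missing_details(text: str, intent: str) -> list[str]:
--     lowered = text.lower()
--     out: list[str] = []
--
--     if len(text.split()) < 8:
--         out.append("primary objective and desired outcome")
--
--     if intent == "build":
--         if not any(k in lowered for k in ("python", "typescript", "javascript", "go", "rust", "java")):
--             out.append("preferred language or framework")
--         if not any(k in lowered for k in ("file", "api", "service", "cli", "script", "app")):
--             out.append("expected output artifact")
--     elif intent == "research":
--         if not any(k in lowered for k in ("today", "latest", "recent", "202", "this week", "this month")):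
--             out.append("time horizon / recency window")
--         if not any(k in lowered for k in ("compare", "best", "tradeoff", "criteria", "pros", "cons")):
--             out.append("evaluation criteria")
--     elif intent == "deploy":
--         if not any(k in lowered for k in ("railway", "production", "staging", "service", "environment")):
--             out.append("target environment or service")
--         if not any(k in lowered for k in ("rollback", "safe", "health", "downtime")):
--             out.append("rollback and safety requirements")
--     elif intent == "operate":
--         if not any(k in lowered for k in ("service", "api", "worker", "database", "nats", "queue", "agent")):
--             out.append("affected system/component")
--     elif intent in {"automation", "automate"}:
--         if not any(k in lowered for k in ("hourly", "daily", "weekly", "schedule", "trigger", "event")):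
--             out.append("trigger cadence or event source")
--         if not any(k in lowered for k in ("discord", "notion", "email", "slack", "webhook", "output")):
--             out.append("destination for automation outputs")
--     elif intent == "audit":
--         if not any(k in lowered for k in ("repo", "service", "system", "scope", "component")):
--             out.append("target system or scope")
--     elif intent == "strategy":
--         if not any(k in lowered for k in ("tradeoff", "goal", "constraint", "timeline", "outcome")):
--             out.append("decision criteria or desired outcome")
--     elif intent == "media":
--         if not any(k in lowered for k in ("image", "video", "audio", "visual", "format")):
--             out.append("target media format or output")
--
--     return out
-- ===== SOURCE B (Python) =====
-- # One flat list of rules (intents, keywords, missing-detail); all keywords are tested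
-- # against the text once into a hit list, then a single comprehension keeps the details
-- # of the current intent whose keyword set is disjoint from the hits.
-- _RULES = [
--     (("build",), ("python", "typescript", "javascript", "go", "rust", "java"),
--      "preferred language or framework"),
--     (("build",), ("file", "api", "service", "cli", "script", "app"),
--      "expected output artifact"),
--     (("research",), ("today", "latest", "recent", "202", "this week", "this month"),
--      "time horizon / recency window"),
--     (("research",), ("compare", "best", "tradeoff", "criteria", "pros", "cons"),
--      "evaluation criteria"),
--     (("deploy",), ("railway", "production", "staging", "service", "environment"),
--      "target environment or service"),
--     (("deploy",), ("rollback", "safe", "health", "downtime"),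
--      "rollback and safety requirements"),
--     (("operate",), ("service", "api", "worker", "database", "nats", "queue", "agent"),
--      "affected system/component"),
--     (("automation", "automate"), ("hourly", "daily", "weekly", "schedule", "trigger", "event"),
--      "trigger cadence or event source"),
--     (("automation", "automate"), ("discord", "notion", "email", "slack", "webhook", "output"),
--      "destination for automation outputs"),
--     (("audit",), ("repo", "service", "system", "scope", "component"),
--      "target system or scope"),
--     (("strategy",), ("tradeoff", "goal", "constraint", "timeline", "outcome"),
--      "decision criteria or desired outcome"),
--     (("media",), ("image", "video", "audio", "visual", "format"),
--      "target media format or output"),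
-- ]
-- _ALL_KEYWORDS = [k for _, ks, _ in _RULES for k in ks]
--
--
-- def _missing_details(text: str, intent: str) -> list[str]:
--     lowered = text.lower()
--     hits = [k for k in _ALL_KEYWORDS if k in lowered]
--     out = ["primary objective and desired outcome"] if len(text.split()) < 8 else []
--     out += [d for intents, ks, d in _RULES
--             if intent in intents and all(k not in hits for k in ks)]
--     return out
-- ===== Notes on version B (the rewrite author's own statement) =====
-- stated objective: alternative
-- what changed: Replaces the if/elif per-intent dispatch with one flat rule list (intents, keywords, detail): all keywords in the vocabulary are matched against the text once into a hit list, then a single comprehension keeps details of the current intent whose keyword set is disjoint from the hits.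
import Mathlib
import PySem

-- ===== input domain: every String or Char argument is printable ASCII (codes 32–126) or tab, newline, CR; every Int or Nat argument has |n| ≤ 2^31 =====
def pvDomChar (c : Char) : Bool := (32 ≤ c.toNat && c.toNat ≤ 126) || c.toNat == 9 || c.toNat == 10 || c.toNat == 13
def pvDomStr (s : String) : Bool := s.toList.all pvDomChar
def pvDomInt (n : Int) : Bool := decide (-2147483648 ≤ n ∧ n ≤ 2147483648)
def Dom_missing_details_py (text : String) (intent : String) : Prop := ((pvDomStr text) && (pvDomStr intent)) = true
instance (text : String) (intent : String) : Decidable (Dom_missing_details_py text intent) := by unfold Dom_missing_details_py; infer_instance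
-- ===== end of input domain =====

-- B replaces A's if/elif keyword dispatch by one flat rule list plus a precomputed keyword-hit list and a disjointness filter: same behaviour, different decomposition (no speed claim).

-- ===== PORT A =====
def missing_details_py (text : String) (intent : String) : List String :=
  let lowered := PySem.Str.lower text
  let out : List String :=
    if (PySem.Str.split₀ text).length < 8 then ["primary objective and desired outcome"] else []
  if intent == "build" then
    let out := if !(["python", "typescript", "javascript", "go", "rust", "java"].any
        (fun k => PySem.Str.isIn k lowered)) then out ++ ["preferred language or framework"] else out
    if !(["file", "api", "service", "cli", "script", "app"].any
        (fun k => PySem.Str.isIn k lowered)) then out ++ ["expected output artifact"] else out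
  else if intent == "research" then
    let out := if !(["today", "latest", "recent", "202", "this week", "this month"].any
        (fun k => PySem.Str.isIn k lowered)) then out ++ ["time horizon / recency window"] else out
    if !(["compare", "best", "tradeoff", "criteria", "pros", "cons"].any
        (fun k => PySem.Str.isIn k lowered)) then out ++ ["evaluation criteria"] else out
  else if intent == "deploy" then
    let out := if !(["railway", "production", "staging", "service", "environment"].any
        (fun k => PySem.Str.isIn k lowered)) then out ++ ["target environment or service"] else out
    if !(["rollback", "safe", "health", "downtime"].any
        (fun k => PySem.Str.isIn k lowered)) then out ++ ["rollback and safety requirements"] else out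
  else if intent == "operate" then
    if !(["service", "api", "worker", "database", "nats", "queue", "agent"].any
        (fun k => PySem.Str.isIn k lowered)) then out ++ ["affected system/component"] else out
  else if intent == "automation" || intent == "automate" then
    let out := if !(["hourly", "daily", "weekly", "schedule", "trigger", "event"].any
        (fun k => PySem.Str.isIn k lowered)) then out ++ ["trigger cadence or event source"] else out
    if !(["discord", "notion", "email", "slack", "webhook", "output"].any
        (fun k => PySem.Str.isIn k lowered)) then out ++ ["destination for automation outputs"] else out
  else if intent == "audit" then
    if !(["repo", "service", "system", "scope", "component"].any
        (fun k => PySem.Str.isIn k lowered)) then out ++ ["target system or scope"] else out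
  else if intent == "strategy" then
    if !(["tradeoff", "goal", "constraint", "timeline", "outcome"].any
        (fun k => PySem.Str.isIn k lowered)) then out ++ ["decision criteria or desired outcome"] else out
  else if intent == "media" then
    if !(["image", "video", "audio", "visual", "format"].any
        (fun k => PySem.Str.isIn k lowered)) then out ++ ["target media format or output"] else out
  else out

-- ===== PORT B =====
-- flat rule list: (intents this rule belongs to, keywords, missing-detail string)
def bRules : List (List String × List String × String) :=
  [ (["build"], ["python", "typescript", "javascript", "go", "rust", "java"],
     "preferred language or framework"),
    (["build"], ["file", "api", "service", "cli", "script", "app"],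
     "expected output artifact"),
    (["research"], ["today", "latest", "recent", "202", "this week", "this month"],
     "time horizon / recency window"),
    (["research"], ["compare", "best", "tradeoff", "criteria", "pros", "cons"],
     "evaluation criteria"),
    (["deploy"], ["railway", "production", "staging", "service", "environment"],
     "target environment or service"),
    (["deploy"], ["rollback", "safe", "health", "downtime"],
     "rollback and safety requirements"),
    (["operate"], ["service", "api", "worker", "database", "nats", "queue", "agent"],
     "affected system/component"),
    (["automation", "automate"], ["hourly", "daily", "weekly", "schedule", "trigger", "event"],
     "trigger cadence or event source"),
    (["automation", "automate"], ["discord", "notion", "email", "slack", "webhook", "output"],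
     "destination for automation outputs"),
    (["audit"], ["repo", "service", "system", "scope", "component"],
     "target system or scope"),
    (["strategy"], ["tradeoff", "goal", "constraint", "timeline", "outcome"],
     "decision criteria or desired outcome"),
    (["media"], ["image", "video", "audio", "visual", "format"],
     "target media format or output") ]

def allKeywords : List String := bRules.flatMap (fun r => r.2.1)

def missing_details_py_alt (text : String) (intent : String) : List String :=
  let lowered := PySem.Str.lower text
  let hits := allKeywords.filter (fun k => PySem.Str.isIn k lowered)
  let out : List String :=
    if (PySem.Str.split₀ text).length < 8 then ["primary objective and desired outcome"] else []
  out ++ ((bRules.filter (fun r =>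
      r.1.contains intent && r.2.1.all (fun k => !(hits.contains k)))).map (fun r => r.2.2))

-- ===== PRECONDITION & SPEC =====
def Spec_missing_details_py (text : String) (intent : String) (out : List String) : Prop := out = missing_details_py_alt text intent
instance (text : String) (intent : String) (out : List String) : Decidable (Spec_missing_details_py text intent out) := by unfold Spec_missing_details_py; infer_instance

-- ===== CLAIM (what is proved, stated in full; the proofs are below) =====
def Claim_equal_missing_details_py : Prop := ∀ (text : String) (intent : String), Dom_missing_details_py text intent → Spec_missing_details_py text intent (missing_details_py text intent)

-- ===== LEMMAS AND PROOFS =====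

-- ===== VERDICT (by name: the statement is the Claim_ definition above) =====
set_option maxHeartbeats 4000000 in
theorem missing_details_py_spec : Claim_equal_missing_details_py := by
  intro text intent _
  unfold Spec_missing_details_py
  by_cases h1 : intent = "build"
  · subst h1
    simp [missing_details_py, missing_details_py_alt, bRules, List.filter_cons, List.all_cons,
      (by decide : ("python":String) ∈ allKeywords),
      (by decide : ("typescript":String) ∈ allKeywords),
      (by decide : ("javascript":String) ∈ allKeywords),
      (by decide : ("go":String) ∈ allKeywords),
      (by decide : ("rust":String) ∈ allKeywords),
      (by decide : ("java":String) ∈ allKeywords),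
      (by decide : ("file":String) ∈ allKeywords),
      (by decide : ("api":String) ∈ allKeywords),
      (by decide : ("service":String) ∈ allKeywords),
      (by decide : ("cli":String) ∈ allKeywords),
      (by decide : ("script":String) ∈ allKeywords),
      (by decide : ("app":String) ∈ allKeywords)]
    split_ifs <;> simp_all
  by_cases h2 : intent = "research"
  · subst h2
    simp [missing_details_py, missing_details_py_alt, bRules, List.filter_cons, List.all_cons,
      (by decide : ("today":String) ∈ allKeywords),
      (by decide : ("latest":String) ∈ allKeywords),
      (by decide : ("recent":String) ∈ allKeywords),
      (by decide : ("202":String) ∈ allKeywords),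
      (by decide : ("this week":String) ∈ allKeywords),
      (by decide : ("this month":String) ∈ allKeywords),
      (by decide : ("compare":String) ∈ allKeywords),
      (by decide : ("best":String) ∈ allKeywords),
      (by decide : ("tradeoff":String) ∈ allKeywords),
      (by decide : ("criteria":String) ∈ allKeywords),
      (by decide : ("pros":String) ∈ allKeywords),
      (by decide : ("cons":String) ∈ allKeywords)]
    split_ifs <;> simp_all
  by_cases h3 : intent = "deploy"
  · subst h3
    simp [missing_details_py, missing_details_py_alt, bRules, List.filter_cons, List.all_cons,
      (by decide : ("railway":String) ∈ allKeywords),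
      (by decide : ("production":String) ∈ allKeywords),
      (by decide : ("staging":String) ∈ allKeywords),
      (by decide : ("service":String) ∈ allKeywords),
      (by decide : ("environment":String) ∈ allKeywords),
      (by decide : ("rollback":String) ∈ allKeywords),
      (by decide : ("safe":String) ∈ allKeywords),
      (by decide : ("health":String) ∈ allKeywords),
      (by decide : ("downtime":String) ∈ allKeywords)]
    split_ifs <;> simp_all
  by_cases h4 : intent = "operate"
  · subst h4
    simp [missing_details_py, missing_details_py_alt, bRules, List.filter_cons, List.all_cons,
      (by decide : ("service":String) ∈ allKeywords),
      (by decide : ("api":String) ∈ allKeywords),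
      (by decide : ("worker":String) ∈ allKeywords),
      (by decide : ("database":String) ∈ allKeywords),
      (by decide : ("nats":String) ∈ allKeywords),
      (by decide : ("queue":String) ∈ allKeywords),
      (by decide : ("agent":String) ∈ allKeywords)]
    split_ifs <;> simp_all
  by_cases h5 : intent = "automation"
  · subst h5
    simp [missing_details_py, missing_details_py_alt, bRules, List.filter_cons, List.all_cons,
      (by decide : ("hourly":String) ∈ allKeywords),
      (by decide : ("daily":String) ∈ allKeywords),
      (by decide : ("weekly":String) ∈ allKeywords),
      (by decide : ("schedule":String) ∈ allKeywords),
      (by decide : ("trigger":String) ∈ allKeywords),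
      (by decide : ("event":String) ∈ allKeywords),
      (by decide : ("discord":String) ∈ allKeywords),
      (by decide : ("notion":String) ∈ allKeywords),
      (by decide : ("email":String) ∈ allKeywords),
      (by decide : ("slack":String) ∈ allKeywords),
      (by decide : ("webhook":String) ∈ allKeywords),
      (by decide : ("output":String) ∈ allKeywords)]
    split_ifs <;> simp_all
  by_cases h6 : intent = "automate"
  · subst h6
    simp [missing_details_py, missing_details_py_alt, bRules, List.filter_cons, List.all_cons,
      (by decide : ("hourly":String) ∈ allKeywords),
      (by decide : ("daily":String) ∈ allKeywords),
      (by decide : ("weekly":String) ∈ allKeywords),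
      (by decide : ("schedule":String) ∈ allKeywords),
      (by decide : ("trigger":String) ∈ allKeywords),
      (by decide : ("event":String) ∈ allKeywords),
      (by decide : ("discord":String) ∈ allKeywords),
      (by decide : ("notion":String) ∈ allKeywords),
      (by decide : ("email":String) ∈ allKeywords),
      (by decide : ("slack":String) ∈ allKeywords),
      (by decide : ("webhook":String) ∈ allKeywords),
      (by decide : ("output":String) ∈ allKeywords)]
    split_ifs <;> simp_all
  by_cases h7 : intent = "audit"
  · subst h7
    simp [missing_details_py, missing_details_py_alt, bRules, List.filter_cons, List.all_cons,
      (by decide : ("repo":String) ∈ allKeywords),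
      (by decide : ("service":String) ∈ allKeywords),
      (by decide : ("system":String) ∈ allKeywords),
      (by decide : ("scope":String) ∈ allKeywords),
      (by decide : ("component":String) ∈ allKeywords)]
    split_ifs <;> simp_all
  by_cases h8 : intent = "strategy"
  · subst h8
    simp [missing_details_py, missing_details_py_alt, bRules, List.filter_cons, List.all_cons,
      (by decide : ("tradeoff":String) ∈ allKeywords),
      (by decide : ("goal":String) ∈ allKeywords),
      (by decide : ("constraint":String) ∈ allKeywords),
      (by decide : ("timeline":String) ∈ allKeywords),
      (by decide : ("outcome":String) ∈ allKeywords)]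
    split_ifs <;> simp_all
  by_cases h9 : intent = "media"
  · subst h9
    simp [missing_details_py, missing_details_py_alt, bRules, List.filter_cons, List.all_cons,
      (by decide : ("image":String) ∈ allKeywords),
      (by decide : ("video":String) ∈ allKeywords),
      (by decide : ("audio":String) ∈ allKeywords),
      (by decide : ("visual":String) ∈ allKeywords),
      (by decide : ("format":String) ∈ allKeywords)]
    split_ifs <;> simp_all
  -- unknown intent: no rule applies on either side
  simp [missing_details_py, missing_details_py_alt, bRules,
    h1, h2, h3, h4, h5, h6, h7, h8, h9]
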